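-- pv_equiv track=rewrite | github.com/fathima-irfana-np/Isquared_OTlabs_Internship | Website crawling assistant/src/enrich_crawl_for_ai.py | classify_elements
-- ===== SOURCE A (Python) =====
-- from collections import defaultdict
--
-- def normalize_text(text):
--     return text.strip() if text and text != "unnamed_element" else None
--
-- def classify_elements(elements):
--     ui_groups = defaultdict(list)
--
--     for el in elements:
--         tag = el.get("type")
--         text = normalize_text(el.get("text"))
--         href = el.get("href")
--         el_id = el.get("id")
--         action = el.get("action")
--
--         if href:
--             ui_groups["links"].append(text or href)
--         elif tag == "button":
--             ui_groups["buttons"].append(text or el_id)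
--         elif tag == "input":
--             ui_groups["inputs"].append(text or el_id)
--         elif action:
--             ui_groups["interactive_widgets"].append(text or el_id)
--         else:
--             ui_groups["unknown_clickables"].append(text or el_id)
--
--     for k in ui_groups:
--         ui_groups[k] = sorted(set(filter(None, ui_groups[k])))
--
--     return dict(ui_groups)
-- ===== SOURCE B (Python) =====
-- def normalize_text(text):
--     return text.strip() if text and text != "unnamed_element" else None
--
--
-- def classify_elements(elements):
--     # Different decomposition: classify each element with a pure `category`
--     # function, take the group keys in first-occurrence order, then build each
--     # group by an independent filter over the full elements list.
--     def category(el):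
--         if el.get("href"):
--             return "links"
--         tag = el.get("type")
--         if tag == "button":
--             return "buttons"
--         if tag == "input":
--             return "inputs"
--         if el.get("action"):
--             return "interactive_widgets"
--         return "unknown_clickables"
--
--     def label(el):
--         text = normalize_text(el.get("text"))
--         if category(el) == "links":
--             return text or el.get("href")
--         return text or el.get("id")
--
--     keys = dict.fromkeys(category(el) for el in elements)
--     return {k: sorted({v for v in (label(el) for el in elements
--                                    if category(el) == k) if v})
--             for k in keys}
-- ===== Notes on version B (the rewrite author's own statement) =====
-- stated objective: alternative
-- what changed: A builds the groups imperatively in one priority-ordered loop appending into a defaultdict; B instead defines a pure per-element category function, takes the group keys in first-occurrence order, and builds each group by an independent filter-and-label pass over the full elements list.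
import Mathlib
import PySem

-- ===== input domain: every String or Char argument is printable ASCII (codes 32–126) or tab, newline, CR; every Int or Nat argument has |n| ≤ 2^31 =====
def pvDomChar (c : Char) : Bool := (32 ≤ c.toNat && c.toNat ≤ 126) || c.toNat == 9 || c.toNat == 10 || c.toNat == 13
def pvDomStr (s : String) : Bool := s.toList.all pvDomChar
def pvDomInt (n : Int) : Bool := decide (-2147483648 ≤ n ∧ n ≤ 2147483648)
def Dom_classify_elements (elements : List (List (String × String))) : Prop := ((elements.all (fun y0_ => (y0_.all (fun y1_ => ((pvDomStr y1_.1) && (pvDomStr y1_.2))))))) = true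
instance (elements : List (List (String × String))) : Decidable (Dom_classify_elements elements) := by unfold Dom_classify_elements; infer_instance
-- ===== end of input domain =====

-- B replaces A's single priority-ordered grouping loop by a pure per-element category
-- function plus independent per-category filters (objective: alternative decomposition).

-- ===== PORT A =====
-- Python truthiness of an Optional[str]
def pvTruthy (o : Option String) : Bool :=
  match o with
  | some s => s != ""
  | none => false

-- Python `t or u` on Optional[str]
def pvOr (t u : Option String) : Option String :=
  if pvTruthy t then t else u

-- helper normalize_text (shared source-level helper; B's Python redefines it identically)
def normalize_text (text : Option String) : Option String :=
  if pvTruthy text && text != some "unnamed_element" then text.map PySem.Str.strip else none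

def classify_elements (elements : List (List (String × String))) : List (String × List String) :=
  (elements.foldl (fun (d : PySem.Dict String (List (Option String))) el =>
    let tag := PySem.Dict.get? (PySem.Dict.mk el) "type"
    let text := normalize_text (PySem.Dict.get? (PySem.Dict.mk el) "text")
    let href := PySem.Dict.get? (PySem.Dict.mk el) "href"
    let el_id := PySem.Dict.get? (PySem.Dict.mk el) "id"
    let action := PySem.Dict.get? (PySem.Dict.mk el) "action"
    if pvTruthy href then PySem.Dict.modify d "links" [] (· ++ [pvOr text href])
    else if tag == some "button" then PySem.Dict.modify d "buttons" [] (· ++ [pvOr text el_id])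
    else if tag == some "input" then PySem.Dict.modify d "inputs" [] (· ++ [pvOr text el_id])
    else if pvTruthy action then PySem.Dict.modify d "interactive_widgets" [] (· ++ [pvOr text el_id])
    else PySem.Dict.modify d "unknown_clickables" [] (· ++ [pvOr text el_id]))
    (PySem.Dict.mk [])).items.map (fun kv => (kv.1,
    PySem.List.sorted (PySem.Set.ofList (kv.2.filterMap (fun v => if pvTruthy v then v else none)))
      (fun x => x) false))

-- ===== PORT B =====
def pvCategory (el : List (String × String)) : String :=
  if pvTruthy (PySem.Dict.get? (PySem.Dict.mk el) "href") then "links"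
  else
    let tag := PySem.Dict.get? (PySem.Dict.mk el) "type"
    if tag == some "button" then "buttons"
    else if tag == some "input" then "inputs"
    else if pvTruthy (PySem.Dict.get? (PySem.Dict.mk el) "action") then "interactive_widgets"
    else "unknown_clickables"

def pvLabel (el : List (String × String)) : Option String :=
  let text := normalize_text (PySem.Dict.get? (PySem.Dict.mk el) "text")
  if pvCategory el == "links" then pvOr text (PySem.Dict.get? (PySem.Dict.mk el) "href")
  else pvOr text (PySem.Dict.get? (PySem.Dict.mk el) "id")

def classify_elements_alt (elements : List (List (String × String))) : List (String × List String) :=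
  (PySem.List.dedup (elements.map pvCategory)).map (fun k => (k,
    PySem.List.sorted (PySem.Set.ofList ((elements.filter (fun el => pvCategory el == k)).filterMap
      (fun el => if pvTruthy (pvLabel el) then pvLabel el else none)))
      (fun x => x) false))

-- ===== PRECONDITION & SPEC =====
def Spec_classify_elements (elements : List (List (String × String))) (out : List (String × List String)) : Prop := out = classify_elements_alt elements
instance (elements : List (List (String × String))) (out : List (String × List String)) : Decidable (Spec_classify_elements elements out) := by unfold Spec_classify_elements; infer_instance

-- ===== CLAIM (what is proved, stated in full; the proofs are below) =====
def Claim_equal_classify_elements : Prop := ∀ (elements : List (List (String × String))), Dom_classify_elements elements → Spec_classify_elements elements (classify_elements elements)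

-- ===== LEMMAS AND PROOFS =====

-- A's loop body is exactly "append pvLabel to the pvCategory group"
lemma stepA_eq (d : PySem.Dict String (List (Option String))) (el : List (String × String)) :
    (let tag := PySem.Dict.get? (PySem.Dict.mk el) "type"
     let text := normalize_text (PySem.Dict.get? (PySem.Dict.mk el) "text")
     let href := PySem.Dict.get? (PySem.Dict.mk el) "href"
     let el_id := PySem.Dict.get? (PySem.Dict.mk el) "id"
     let action := PySem.Dict.get? (PySem.Dict.mk el) "action"
     if pvTruthy href then PySem.Dict.modify d "links" [] (· ++ [pvOr text href])
     else if tag == some "button" then PySem.Dict.modify d "buttons" [] (· ++ [pvOr text el_id])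
     else if tag == some "input" then PySem.Dict.modify d "inputs" [] (· ++ [pvOr text el_id])
     else if pvTruthy action then PySem.Dict.modify d "interactive_widgets" [] (· ++ [pvOr text el_id])
     else PySem.Dict.modify d "unknown_clickables" [] (· ++ [pvOr text el_id]))
    = PySem.Dict.modify d (pvCategory el) [] (· ++ [pvLabel el]) := by
  simp only [pvCategory, pvLabel]
  split_ifs <;> simp_all

-- values collected for key k out of the (category, label) pair list
def grpVal (ps : List (String × Option String)) (k : String) : List (Option String) :=
  (ps.filter (fun p => p.1 == k)).map Prod.snd

lemma grpVal_cons (p : String × Option String) (ps : List (String × Option String)) (k : String) :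
    grpVal (p :: ps) k = if p.1 = k then p.2 :: grpVal ps k else grpVal ps k := by
  simp only [grpVal, List.filter_cons]
  by_cases h : p.1 = k <;> simp [h]

-- first-occurrence dedup commutes with filter
lemma dedup_filter (l : List String) (q : String → Bool) :
    PySem.List.dedup (l.filter q) = (PySem.List.dedup l).filter q := by
  induction l with
  | nil => rfl
  | cons x xs ih =>
    simp only [PySem.List.dedup] at *
    by_cases hq : q x
    · rw [List.filter_cons_of_pos hq, PySem.Set.ofList_cons, PySem.Set.ofList_cons,
        List.filter_cons_of_pos hq]
      simp only [PySem.Set.discard, ih, List.filter_filter]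
      exact congrArg _ (List.filter_congr (fun y _ => by rw [Bool.and_comm]))
    · rw [List.filter_cons_of_neg hq, PySem.Set.ofList_cons, List.filter_cons_of_neg hq, ih]
      simp only [PySem.Set.discard, List.filter_filter]
      refine List.filter_congr (fun y _ => ?_)
      by_cases hy : y = x
      · subst hy; simp [hq]
      · simp [hy]

-- first-match lookup in a nodup-keyed items list finds the entry itself
lemma find?_of_nodup_keys {ν : Type} (l : List (String × ν))
    (hd : (l.map Prod.fst).Nodup) (kv : String × ν) (h : kv ∈ l) :
    l.find? (fun p => p.1 == kv.1) = some kv := by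
  induction l with
  | nil => cases h
  | cons a l ih =>
    simp only [List.map_cons, List.nodup_cons] at hd
    rcases List.mem_cons.1 h with h1 | h1
    · subst h1; simp
    · have hne : a.1 ≠ kv.1 := fun he => hd.1 (he ▸ List.mem_map_of_mem h1)
      rw [List.find?_cons_of_neg (by simpa using hne), ih hd.2 h1]

-- the defaultdict-append loop, characterised on the items list
lemma foldl_modify_items (ps : List (String × Option String))
    (d : PySem.Dict String (List (Option String)))
    (hd : (d.items.map Prod.fst).Nodup) :
    (ps.foldl (fun d p => PySem.Dict.modify d p.1 [] (· ++ [p.2])) d).items =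
      d.items.map (fun kv => (kv.1, kv.2 ++ grpVal ps kv.1))
      ++ (PySem.List.dedup ((ps.map Prod.fst).filter
            (fun k => !((d.items.map Prod.fst).contains k)))).map
           (fun k => (k, grpVal ps k)) := by
  induction ps generalizing d with
  | nil => simp [grpVal]
  | cons p ps ih =>
    rw [List.foldl_cons]
    by_cases hmem : p.1 ∈ d.items.map Prod.fst
    · -- existing key: insert overwrites in place, keys unchanged
      obtain ⟨kv₀, hkv₀, hk₀⟩ := List.mem_map.1 hmem
      have hcont : d.contains p.1 = true := by
        simp only [PySem.Dict.contains, List.any_eq_true]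
        exact ⟨kv₀, hkv₀, by simp [hk₀]⟩
      have hfind : d.items.find? (fun q => q.1 == p.1) = some kv₀ := by
        rw [← hk₀]; exact find?_of_nodup_keys _ hd _ hkv₀
      have hgetD : PySem.Dict.getD d p.1 [] = kv₀.2 := by
        simp [PySem.Dict.getD, PySem.Dict.get?, hfind]
      have hitems : (PySem.Dict.modify d p.1 [] (· ++ [p.2])).items
          = d.items.map (fun q => if q.1 = p.1 then (p.1, kv₀.2 ++ [p.2]) else q) := by
        simp [PySem.Dict.modify, PySem.Dict.insert, hcont, hgetD]
      have hkeys : ((PySem.Dict.modify d p.1 [] (· ++ [p.2])).items.map Prod.fst)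
          = d.items.map Prod.fst := by
        rw [hitems, List.map_map]
        refine List.map_congr_left (fun q _ => ?_)
        by_cases h : q.1 = p.1 <;> simp [h]
      rw [ih _ (by rw [hkeys]; exact hd), hkeys]
      congr 1
      · rw [hitems, List.map_map]
        refine List.map_congr_left (fun kv hkv => ?_)
        by_cases h : kv.1 = p.1
        · have hkv₀' : kv = kv₀ := by
            have h1 := find?_of_nodup_keys _ hd _ hkv
            rw [h] at h1; rw [h1] at hfind; exact Option.some_inj.1 hfind
          simp only [grpVal_cons, hkv₀']
          simp [← hkv₀' ▸ h]
        · simp only [Function.comp, if_neg h, grpVal_cons]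
          rw [if_neg (fun he => h he.symm)]
      · have hflt : ((p :: ps).map Prod.fst).filter
              (fun k => !((d.items.map Prod.fst).contains k))
            = (ps.map Prod.fst).filter (fun k => !((d.items.map Prod.fst).contains k)) := by
          rw [List.map_cons, List.filter_cons_of_neg (by simpa using hmem)]
        rw [hflt]
        refine List.map_congr_left (fun k hk => ?_)
        have hk' : k ∈ (ps.map Prod.fst).filter
            (fun k => !((d.items.map Prod.fst).contains k)) := by
          simpa only [PySem.List.dedup, PySem.Set.mem_ofList] using hk
        have hne : p.1 ≠ k := by
          intro he
          have h2 := (List.mem_filter.1 hk').2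
          rw [← he] at h2
          simp [hmem] at h2
        rw [grpVal_cons, if_neg hne]
    · -- new key: appended at the end
      have hcont : d.contains p.1 = false := by
        simp only [PySem.Dict.contains, List.any_eq_false]
        intro q hq
        simp only [beq_iff_eq]
        exact fun he => hmem (he ▸ List.mem_map_of_mem hq)
      have hfind : d.items.find? (fun q => q.1 == p.1) = none := by
        apply List.find?_eq_none.2
        intro q hq
        simp only [beq_iff_eq]
        exact fun he => hmem (he ▸ List.mem_map_of_mem hq)
      have hgetD : PySem.Dict.getD d p.1 [] = [] := by
        simp [PySem.Dict.getD, PySem.Dict.get?, hfind]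
      have hitems : (PySem.Dict.modify d p.1 [] (· ++ [p.2])).items
          = d.items ++ [(p.1, [p.2])] := by
        simp [PySem.Dict.modify, PySem.Dict.insert, hcont, hgetD]
      have hkeys : ((PySem.Dict.modify d p.1 [] (· ++ [p.2])).items.map Prod.fst)
          = d.items.map Prod.fst ++ [p.1] := by
        rw [hitems, List.map_append]; rfl
      have hnodup' : (((PySem.Dict.modify d p.1 [] (· ++ [p.2])).items.map Prod.fst)).Nodup := by
        rw [hkeys]
        refine List.Nodup.append hd (List.nodup_singleton _) ?_
        intro a ha hb
        rw [List.mem_singleton] at hb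
        exact hmem (hb ▸ ha)
      have hkeys2 : List.map Prod.fst (d.items ++ [(p.1, [p.2])])
          = List.map Prod.fst d.items ++ [p.1] := by
        rw [List.map_append]; rfl
      rw [ih _ hnodup', hitems, hkeys2]
      -- right-hand side: the new key p.1 heads the fresh-keys block
      have hrhs : ((p :: ps).map Prod.fst).filter
            (fun k => !((d.items.map Prod.fst).contains k))
          = p.1 :: (ps.map Prod.fst).filter (fun k => !((d.items.map Prod.fst).contains k)) := by
        rw [List.map_cons, List.filter_cons_of_pos (by simpa using hmem)]
      rw [hrhs]
      have hded : PySem.List.dedup (p.1 :: (ps.map Prod.fst).filter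
              (fun k => !((d.items.map Prod.fst).contains k)))
          = p.1 :: PySem.List.dedup ((ps.map Prod.fst).filter
              (fun k => !((d.items.map Prod.fst ++ [p.1]).contains k))) := by
        show PySem.Set.ofList _ = _
        rw [PySem.Set.ofList_cons]
        congr 1
        show List.filter (fun y => !y == p.1) (PySem.List.dedup _) = _
        rw [← dedup_filter, List.filter_filter]
        congr 1
        refine List.filter_congr (fun k _ => ?_)
        by_cases h1 : k = p.1 <;> by_cases h2 : k ∈ List.map Prod.fst d.items <;>
          simp [h1, h2, List.mem_append]
      rw [hded]
      simp only [List.map_append, List.append_assoc]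
      congr 1
      · -- old entries: key ≠ p.1, so grpVal unchanged by the new pair
        refine List.map_congr_left (fun kv hkv => ?_)
        have hne : p.1 ≠ kv.1 := fun he => hmem (he ▸ List.mem_map_of_mem hkv)
        simp only [grpVal_cons, if_neg hne]
      · -- new block: p.1 gets p.2 prepended, the later fresh keys are ≠ p.1
        simp only [List.map_cons, List.map_nil, List.nil_append, List.cons_append, grpVal_cons]
        congr 1
        refine List.map_congr_left (fun k hk => ?_)
        have hk' : k ∈ (ps.map Prod.fst).filter
            (fun k => !((d.items.map Prod.fst ++ [p.1]).contains k)) := by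
          simpa only [PySem.List.dedup, PySem.Set.mem_ofList] using hk
        have hne : p.1 ≠ k := by
          intro he
          have h2 := (List.mem_filter.1 hk').2
          rw [← he] at h2
          simp at h2
        rw [if_neg hne]

-- A's loop, with every body rewritten by stepA_eq
lemma loopA_eq (elements : List (List (String × String)))
    (init : PySem.Dict String (List (Option String))) :
    elements.foldl (fun d el =>
      let tag := PySem.Dict.get? (PySem.Dict.mk el) "type"
      let text := normalize_text (PySem.Dict.get? (PySem.Dict.mk el) "text")
      let href := PySem.Dict.get? (PySem.Dict.mk el) "href"
      let el_id := PySem.Dict.get? (PySem.Dict.mk el) "id"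
      let action := PySem.Dict.get? (PySem.Dict.mk el) "action"
      if pvTruthy href then PySem.Dict.modify d "links" [] (· ++ [pvOr text href])
      else if tag == some "button" then PySem.Dict.modify d "buttons" [] (· ++ [pvOr text el_id])
      else if tag == some "input" then PySem.Dict.modify d "inputs" [] (· ++ [pvOr text el_id])
      else if pvTruthy action then PySem.Dict.modify d "interactive_widgets" [] (· ++ [pvOr text el_id])
      else PySem.Dict.modify d "unknown_clickables" [] (· ++ [pvOr text el_id])) init
    = elements.foldl (fun d el => PySem.Dict.modify d (pvCategory el) [] (· ++ [pvLabel el])) init := by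
  induction elements generalizing init with
  | nil => rfl
  | cons e es ih =>
    simp only [List.foldl_cons]
    rw [stepA_eq init e, ih]

-- the categorised loop is a fold over the (category, label) pairs
lemma loopA_as_pairs (elements : List (List (String × String)))
    (init : PySem.Dict String (List (Option String))) :
    elements.foldl (fun d el => PySem.Dict.modify d (pvCategory el) [] (· ++ [pvLabel el])) init
    = (elements.map (fun el => (pvCategory el, pvLabel el))).foldl
        (fun d p => PySem.Dict.modify d p.1 [] (· ++ [p.2])) init := by
  induction elements generalizing init <;> simp [*]

lemma grpVal_map (elements : List (List (String × String))) (k : String) :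
    grpVal (elements.map (fun el => (pvCategory el, pvLabel el))) k
      = (elements.filter (fun el => pvCategory el == k)).map pvLabel := by
  simp only [grpVal, List.filter_map, List.map_map]
  rfl

-- ===== VERDICT (by name: the statement is the Claim_ definition above) =====
theorem classify_elements_spec : Claim_equal_classify_elements := by
  intro elements _
  show classify_elements elements = classify_elements_alt elements
  rw [classify_elements, classify_elements_alt, loopA_eq, loopA_as_pairs,
    foldl_modify_items _ _ (by simp)]
  simp only [List.map_nil, List.nil_append, List.contains_nil,
    Bool.not_false, List.filter_true, List.map_map]
  refine List.map_congr_left (fun k _ => ?_)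
  simp [grpVal_map, List.filterMap_map, Function.comp]
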